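-- pv_equiv track=rewrite | github.com/csshlok/Smart_Traffic_AI | scripts/unet/lane_mask.py | tiles
-- ===== SOURCE A (Python) =====
-- from typing import Tuple, Iterator
--
-- def tiles(H: int, W: int, tile_w: int, tile_h: int, overlap: int) -> Iterator[Tuple[int,int,int,int]]:
--     """
--     Yield tile boxes (x0, y0, x1, y1) covering the full image with given overlap.
--     Tiles at borders will be clamped to image bounds.
--     """
--     step_x = tile_w - overlap
--     step_y = tile_h - overlap
--     if step_x <= 0 or step_y <= 0:
--         raise ValueError("TILE_OVERLAP must be smaller than TILE_SIZE in both dimensions.")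
--     y = 0
--     while True:
--         x = 0
--         y1 = min(y + tile_h, H)
--         y0 = max(0, y1 - tile_h)
--         last_row = (y1 == H)
--         while True:
--             x1 = min(x + tile_w, W)
--             x0 = max(0, x1 - tile_w)
--             yield (x0, y0, x1, y1)
--             if x1 == W:
--                 break
--             x += step_x
--         if last_row:
--             break
--         y += step_y
-- ===== SOURCE B (Python) =====
-- def tiles(H, W, tile_w, tile_h, overlap):
--     """
--     Yield tile boxes (x0, y0, x1, y1) covering the full image with given overlap.
--     Computes one list of (start, end) spans per axis, then yields their product
--     (y-outer, x-inner). Kept as a generator so the ValueError raises on first iteration.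
--     """
--     step_x = tile_w - overlap
--     step_y = tile_h - overlap
--     if step_x <= 0 or step_y <= 0:
--         raise ValueError("TILE_OVERLAP must be smaller than TILE_SIZE in both dimensions.")
--
--     def spans(total, tile, step):
--         out = []
--         pos = 0
--         while True:
--             e = min(pos + tile, total)
--             s = max(0, e - tile)
--             out.append((s, e))
--             if e == total:
--                 return out
--             pos += step
--
--     y_spans = spans(H, tile_h, step_y)
--     x_spans = spans(W, tile_w, step_x)
--     for y0, y1 in y_spans:
--         for x0, x1 in x_spans:
--             yield (x0, y0, x1, y1)
-- ===== Notes on version B (the rewrite author's own statement) =====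
-- stated objective: alternative
-- what changed: B replaces A's nested while-loops (recomputing the x clamps in every row) with a per-axis helper that builds each axis's (start,end) span list once, then yields the y-span x x-span product; Pre_ excludes tile_w<=overlap or tile_h<=overlap, where A raises ValueError (B raises the same ValueError there).
import Mathlib
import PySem

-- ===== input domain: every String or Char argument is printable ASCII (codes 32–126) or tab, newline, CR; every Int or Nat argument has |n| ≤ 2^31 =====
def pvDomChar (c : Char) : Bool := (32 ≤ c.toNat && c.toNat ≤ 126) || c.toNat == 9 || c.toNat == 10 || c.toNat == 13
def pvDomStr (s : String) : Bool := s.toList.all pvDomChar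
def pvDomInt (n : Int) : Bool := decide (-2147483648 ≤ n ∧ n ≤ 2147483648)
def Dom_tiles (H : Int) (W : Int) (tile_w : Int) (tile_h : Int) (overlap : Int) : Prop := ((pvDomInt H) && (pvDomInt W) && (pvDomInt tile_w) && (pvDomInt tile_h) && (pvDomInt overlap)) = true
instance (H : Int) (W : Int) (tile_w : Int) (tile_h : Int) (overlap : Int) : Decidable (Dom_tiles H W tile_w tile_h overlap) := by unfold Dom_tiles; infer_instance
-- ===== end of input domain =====

-- B builds each axis's span list once instead of A's nested while-loops; same output, clamp
-- arithmetic done once per axis. Return-value equivalence on Pre_ (both raise ValueError outside).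

-- ===== PORT A =====
-- inner while loop of A: yields (x0, y0, x1, y1) for x = 0, step_x, 2*step_x, …
def tilesInner (W tile_w step_x : Int) (hx : 0 < step_x) (y0 y1 x : Int) :
    List (Int × Int × Int × Int) :=
  let x1 := min (x + tile_w) W
  let x0 := max 0 (x1 - tile_w)
  if x1 = W then [(x0, y0, x1, y1)]
  else (x0, y0, x1, y1) :: tilesInner W tile_w step_x hx y0 y1 (x + step_x)
termination_by (W - tile_w - x).toNat
decreasing_by omega

-- outer while loop of A over y
def tilesOuter (H W tile_w tile_h step_x step_y : Int) (hx : 0 < step_x) (hy : 0 < step_y)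
    (y : Int) : List (Int × Int × Int × Int) :=
  let y1 := min (y + tile_h) H
  let y0 := max 0 (y1 - tile_h)
  let row := tilesInner W tile_w step_x hx y0 y1 0
  if y1 = H then row
  else row ++ tilesOuter H W tile_w tile_h step_x step_y hx hy (y + step_y)
termination_by (H - tile_h - y).toNat
decreasing_by omega

def tiles (H : Int) (W : Int) (tile_w : Int) (tile_h : Int) (overlap : Int) :
    List (Int × Int × Int × Int) :=
  let step_x := tile_w - overlap
  let step_y := tile_h - overlap
  if h : step_x ≤ 0 ∨ step_y ≤ 0 then []  -- Python raises ValueError here (outside Pre_)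
  else tilesOuter H W tile_w tile_h step_x step_y (by omega) (by omega) 0

-- ===== PORT B =====
-- B's per-axis span helper: (start, end) clamped spans along one axis
def spans (total tile step : Int) (h : 0 < step) (pos : Int) : List (Int × Int) :=
  let e := min (pos + tile) total
  let s := max 0 (e - tile)
  if e = total then [(s, e)]
  else (s, e) :: spans total tile step h (pos + step)
termination_by (total - tile - pos).toNat
decreasing_by omega

def tiles_alt (H : Int) (W : Int) (tile_w : Int) (tile_h : Int) (overlap : Int) :
    List (Int × Int × Int × Int) :=
  let step_x := tile_w - overlap
  let step_y := tile_h - overlap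
  if h : step_x ≤ 0 ∨ step_y ≤ 0 then []  -- Python raises ValueError here (outside Pre_)
  else
    let y_spans := spans H tile_h step_y (by omega) 0
    let x_spans := spans W tile_w step_x (by omega) 0
    y_spans.flatMap (fun p => x_spans.map (fun q => (q.1, p.1, q.2, p.2)))

-- ===== PRECONDITION & SPEC =====
-- Pre_ excludes exactly the inputs where the Python raises ValueError (overlap ≥ a tile side).
def Pre_tiles (H : Int) (W : Int) (tile_w : Int) (tile_h : Int) (overlap : Int) : Prop :=
  overlap < tile_w ∧ overlap < tile_h
instance (H : Int) (W : Int) (tile_w : Int) (tile_h : Int) (overlap : Int) : Decidable (Pre_tiles H W tile_w tile_h overlap) := by unfold Pre_tiles; infer_instance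
def pvWitness_tiles : Int × Int × Int × Int × Int := (5, 7, 4, 3, 1)

def Spec_tiles (H : Int) (W : Int) (tile_w : Int) (tile_h : Int) (overlap : Int) (out : List (Int × Int × Int × Int)) : Prop := out = tiles_alt H W tile_w tile_h overlap
instance (H : Int) (W : Int) (tile_w : Int) (tile_h : Int) (overlap : Int) (out : List (Int × Int × Int × Int)) : Decidable (Spec_tiles H W tile_w tile_h overlap out) := by unfold Spec_tiles; infer_instance

-- ===== CLAIM (what is proved, stated in full; the proofs are below) =====
def Claim_equal_tiles : Prop := ∀ (H : Int) (W : Int) (tile_w : Int) (tile_h : Int) (overlap : Int), Dom_tiles H W tile_w tile_h overlap → Pre_tiles H W tile_w tile_h overlap → Spec_tiles H W tile_w tile_h overlap (tiles H W tile_w tile_h overlap)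

-- ===== LEMMAS AND PROOFS =====

theorem spans_last (total tile step : Int) (h : 0 < step) (pos : Int)
    (hl : min (pos + tile) total = total) :
    spans total tile step h pos = [(max 0 (min (pos + tile) total - tile), min (pos + tile) total)] := by
  rw [spans]; simp [hl]

theorem spans_cons (total tile step : Int) (h : 0 < step) (pos : Int)
    (hl : ¬ min (pos + tile) total = total) :
    spans total tile step h pos
      = (max 0 (min (pos + tile) total - tile), min (pos + tile) total)
          :: spans total tile step h (pos + step) := by
  rw [spans]; simp only [if_neg hl]

theorem tilesInner_eq_spans (W tile_w step_x : Int) (hx : 0 < step_x) (y0 y1 x : Int) :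
    tilesInner W tile_w step_x hx y0 y1 x
      = (spans W tile_w step_x hx x).map (fun q => (q.1, y0, q.2, y1)) := by
  fun_induction tilesInner W tile_w step_x hx y0 y1 x with
  | case1 x x1 x0 h =>
      rw [spans]
      simp only [x1, x0] at h ⊢
      rw [if_pos h]
      simp
  | case2 x x1 x0 h ih =>
      rw [spans]
      simp only [x1, x0] at h ⊢
      rw [if_neg h]
      simp [ih]

theorem tilesOuter_eq (H W tile_w tile_h step_x step_y : Int) (hx : 0 < step_x)
    (hy : 0 < step_y) (y : Int) :
    tilesOuter H W tile_w tile_h step_x step_y hx hy y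
      = (spans H tile_h step_y hy y).flatMap
          (fun p => (spans W tile_w step_x hx 0).map (fun q => (q.1, p.1, q.2, p.2))) := by
  fun_induction tilesOuter H W tile_w tile_h step_x step_y hx hy y with
  | case1 y y1 y0 row h =>
      simp only [y1, y0, row] at h ⊢
      rw [spans_last H tile_h step_y hy y h]
      simp [tilesInner_eq_spans, h]
  | case2 y y1 y0 row h ih =>
      simp only [y1, y0, row] at h ⊢
      rw [spans_cons H tile_h step_y hy y h]
      simp [ih, tilesInner_eq_spans]

-- ===== VERDICT (by name: the statement is the Claim_ definition above) =====
theorem tiles_spec : Claim_equal_tiles := by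
  intro H W tile_w tile_h overlap _ hpre
  obtain ⟨h1, h2⟩ := hpre
  unfold Spec_tiles tiles tiles_alt
  have hcond : ¬ (tile_w - overlap ≤ 0 ∨ tile_h - overlap ≤ 0) := by omega
  simp only [hcond, dite_false]
  exact tilesOuter_eq ..
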